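-- pv_equiv track=rewrite | github.com/vladislavneon/style-based-plagiarism-detection | pos_ngram.py | build_vector
-- ===== SOURCE A (Python) =====
-- main_pos = {"NOUN": 0,
--             "ADJ": 1,
--             "VERB": 2,
--             "PRT": 3,
--             "GRND": 4,
--             "ADVB": 5}
--
-- extended_pos = {"NUMR": 0,
--                 "PREP": 1,
--                 "CONJ": 2,
--                 "PRCL": 3,
--                 "INTJ": 4}
--
-- def convert_text(text):
--     converted_text = []
--     for sentence in text:
--         converted_sentence = convert_sentence(sentence)
--         converted_text.append(converted_sentence)
--     return converted_text
--
-- def convert_sentence(sentence):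
--     converted_sentence = []
--     for pos in sentence:
--         if (pos in main_pos):
--             converted_sentence.append(pos)
--     return converted_sentence
--
-- def build_vector(text, type="mixed"):
--     n_mo = 0
--     n_bi = 0
--     if (type == "mixed"):
--         vector = [0] * (6 * 6 + 11)
--         for sentence in text:
--             for pos in sentence:
--                 if (pos in main_pos):
--                     id = main_pos[pos] + 5
--                 else:
--                     id = extended_pos[pos]
--                 vector[id] += 1
--                 n_mo += 1
--         text = convert_text(text)
--         for sentence in text:
--             for i in range(len(sentence) - 1):
--                 pos1 = sentence[i]
--                 pos2 = sentence[i + 1]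
--                 id1 = main_pos[pos1]
--                 id2 = main_pos[pos2]
--                 id = id1 * 6 + id2 + 11
--                 vector[id] += 1
--                 n_bi += 1
--         return vector
--     elif (type == "bigram"):
--         vector = [0] * (6 * 6)
--         text = convert_text(text)
--         for sentence in text:
--             for i in range(len(sentence) - 1):
--                 pos1 = sentence[i]
--                 pos2 = sentence[i + 1]
--                 id1 = main_pos[pos1]
--                 id2 = main_pos[pos2]
--                 id = id1 * 6 + id2
--                 vector[id] += 1
--         return vector
-- ===== SOURCE B (Python) =====
-- main_pos = {"NOUN": 0,
--             "ADJ": 1,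
--             "VERB": 2,
--             "PRT": 3,
--             "GRND": 4,
--             "ADVB": 5}
--
-- extended_pos = {"NUMR": 0,
--                 "PREP": 1,
--                 "CONJ": 2,
--                 "PRCL": 3,
--                 "INTJ": 4}
--
-- def build_vector(text, type="mixed"):
--     if type == "mixed":
--         vector = [0] * (6 * 6 + 11)
--         for sentence in text:
--             prev = None
--             for pos in sentence:
--                 cur = main_pos.get(pos)
--                 if cur is not None:
--                     vector[cur + 5] += 1
--                     if prev is not None:
--                         vector[prev * 6 + cur + 11] += 1
--                     prev = cur
--                 else:
--                     vector[extended_pos[pos]] += 1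
--         return vector
--     if type == "bigram":
--         vector = [0] * (6 * 6)
--         for sentence in text:
--             prev = None
--             for pos in sentence:
--                 cur = main_pos.get(pos)
--                 if cur is not None:
--                     if prev is not None:
--                         vector[prev * 6 + cur] += 1
--                     prev = cur
--         return vector
--     return None
-- ===== Notes on version B (the rewrite author's own statement) =====
-- stated objective: simpler
-- what changed: Replaced A's two phases (a whole-text unigram pass, then convert_text filtering plus an index-window scan for bigrams) with a single per-sentence pass that tracks the previous main-POS tag, emitting unigram and bigram counts together.
import Mathlib
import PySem

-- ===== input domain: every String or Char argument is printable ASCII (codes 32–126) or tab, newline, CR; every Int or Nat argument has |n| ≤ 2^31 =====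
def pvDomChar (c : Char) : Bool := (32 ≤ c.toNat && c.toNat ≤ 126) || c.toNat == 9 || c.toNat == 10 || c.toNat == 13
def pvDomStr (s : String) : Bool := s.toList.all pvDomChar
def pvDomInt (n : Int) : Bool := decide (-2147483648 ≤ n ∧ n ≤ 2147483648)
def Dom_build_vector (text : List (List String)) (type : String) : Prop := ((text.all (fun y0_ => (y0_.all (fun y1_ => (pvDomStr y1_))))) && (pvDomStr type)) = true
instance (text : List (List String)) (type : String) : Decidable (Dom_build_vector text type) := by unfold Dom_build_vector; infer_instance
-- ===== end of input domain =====

-- B merges the two phases of the "mixed"/"bigram" branches into one per-sentence pass that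
-- tracks the previous main-POS tag, removing convert_text and the index-window scan (objective: simpler).

-- module constants shared by both programs: main_pos / extended_pos lookups (dict of literals)
def mainIdx : String → Option Nat
  | "NOUN" => some 0 | "ADJ" => some 1 | "VERB" => some 2
  | "PRT" => some 3 | "GRND" => some 4 | "ADVB" => some 5
  | _ => none

def extIdx : String → Option Nat
  | "NUMR" => some 0 | "PREP" => some 1 | "CONJ" => some 2
  | "PRCL" => some 3 | "INTJ" => some 4 | _ => none

-- Python's `vector[id] += 1`; every id used is in range, so List.set/getD are exact here
def bump (v : List Int) (i : Nat) : List Int := v.set i (v.getD i 0 + 1)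

-- ===== PORT A =====
def convert_sentence (sentence : List String) : List String :=
  sentence.foldl (fun acc pos => if (mainIdx pos).isSome then acc ++ [pos] else acc) []

def convert_text (text : List (List String)) : List (List String) :=
  text.foldl (fun acc s => acc ++ [convert_sentence s]) []

-- one step of A's unigram loop; `none` = Python's KeyError (tag in neither dict)
def uniStepA (ov : Option (List Int)) (pos : String) : Option (List Int) :=
  ov.bind fun v =>
    match mainIdx pos with
    | some i => some (bump v (i + 5))
    | none =>
      match extIdx pos with
      | some i => some (bump v i)
      | none => none

-- A's `for i in range(len(sentence) - 1)` bigram loop over one converted sentence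
def biSentA (off : Nat) (ov : Option (List Int)) (sentence : List String) : Option (List Int) :=
  (List.range (sentence.length - 1)).foldl
    (fun ov i => ov.bind fun v =>
      match mainIdx (sentence.getD i ""), mainIdx (sentence.getD (i + 1) "") with
      | some i1, some i2 => some (bump v (i1 * 6 + i2 + off))
      | _, _ => none) ov

-- (the dead counters n_mo / n_bi of the Python are not carried: they are never read)
def build_vector (text : List (List String)) (type : String) : Option (List Int) :=
  if type = "mixed" then
    let afterUni := text.foldl (fun ov s => s.foldl uniStepA ov) (some (List.replicate 47 (0 : Int)))
    (convert_text text).foldl (biSentA 11) afterUni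
  else if type = "bigram" then
    (convert_text text).foldl (biSentA 0) (some (List.replicate 36 (0 : Int)))
  else none

-- ===== PORT B =====
-- one step of B's single "mixed" pass: state = (vector, previous main tag)
def mixStepB (st : Option (List Int × Option Nat)) (pos : String) : Option (List Int × Option Nat) :=
  st.bind fun vp =>
    match mainIdx pos with
    | some c =>
      let v1 := bump vp.1 (c + 5)
      some (match vp.2 with | some p => bump v1 (p * 6 + c + 11) | none => v1, some c)
    | none =>
      match extIdx pos with
      | some e => some (bump vp.1 e, vp.2)
      | none => none

-- one step of B's single "bigram" pass (never raises)
def biStepB (st : List Int × Option Nat) (pos : String) : List Int × Option Nat :=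
  match mainIdx pos with
  | some c => (match st.2 with | some p => bump st.1 (p * 6 + c) | none => st.1, some c)
  | none => st

def build_vector_alt (text : List (List String)) (type : String) : Option (List Int) :=
  if type = "mixed" then
    text.foldl (fun ov s => ov.bind fun v => (s.foldl mixStepB (some (v, none))).map Prod.fst)
      (some (List.replicate 47 (0 : Int)))
  else if type = "bigram" then
    some (text.foldl (fun v s => (s.foldl biStepB (v, none)).1) (List.replicate 36 (0 : Int)))
  else none

-- ===== PRECONDITION & SPEC =====
-- Pre_ excludes exactly the inputs where A raises KeyError: type "mixed" with a tag in neither dict.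
def Pre_build_vector (text : List (List String)) (type : String) : Prop :=
  type = "mixed" →
    ∀ s ∈ text, ∀ p ∈ s,
      p ∈ ["NOUN", "ADJ", "VERB", "PRT", "GRND", "ADVB", "NUMR", "PREP", "CONJ", "PRCL", "INTJ"]
instance (text : List (List String)) (type : String) : Decidable (Pre_build_vector text type) := by
  unfold Pre_build_vector; infer_instance

def pvWitness_build_vector : List (List String) × String :=
  ([["NOUN", "PREP", "ADJ"], ["VERB"]], "mixed")

def Spec_build_vector (text : List (List String)) (type : String) (out : Option (List Int)) : Prop := out = build_vector_alt text type
instance (text : List (List String)) (type : String) (out : Option (List Int)) : Decidable (Spec_build_vector text type out) := by unfold Spec_build_vector; infer_instance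

-- ===== CLAIM (what is proved, stated in full; the proofs are below) =====
def Claim_equal_build_vector : Prop := ∀ (text : List (List String)) (type : String), Dom_build_vector text type → Pre_build_vector text type → Spec_build_vector text type (build_vector text type)

-- ===== LEMMAS AND PROOFS =====

-- bump at index i, then j, commutes (Python's `vector[id] += 1` on distinct or equal slots)
theorem bump_comm (v : List Int) (i j : Nat) : bump (bump v i) j = bump (bump v j) i := by
  by_cases hij : i = j
  · subst hij; rfl
  · unfold bump
    rw [List.getD, List.getD, List.getD, List.getD,
        List.getElem?_set_ne hij, List.getElem?_set_ne (Ne.symm hij),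
        List.set_comm _ _ hij]

-- fold bump over a list of indices
def bumps (v : List Int) (l : List Nat) : List Int := l.foldl bump v

theorem bumps_perm {l1 l2 : List Nat} (h : List.Perm l1 l2) (v : List Int) :
    bumps v l1 = bumps v l2 := by
  haveI : RightCommutative bump := ⟨fun v i j => bump_comm v i j⟩
  exact h.foldl_eq v

theorem bumps_append (v : List Int) (l1 l2 : List Nat) :
    bumps v (l1 ++ l2) = bumps (bumps v l1) l2 := List.foldl_append

-- lifting an Option-threaded fold whose steps all succeed to a pure fold
theorem optlift {τ σ : Type} (ts : List τ) (F : Option σ → τ → Option σ)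
    (f : σ → τ → σ)
    (h : ∀ t ∈ ts, ∀ v, F (some v) t = some (f v t)) (v : σ) :
    ts.foldl F (some v) = some (ts.foldl f v) := by
  induction ts generalizing v with
  | nil => rfl
  | cons a t ih =>
    rw [List.foldl_cons, List.foldl_cons, h a (List.mem_cons_self) v]
    exact ih (fun t ht v => h t (List.mem_cons_of_mem a ht) v) (f v a)

-- convert_text / convert_sentence in closed form
theorem convert_text_eq (text : List (List String)) :
    convert_text text = text.map convert_sentence := by
  unfold convert_text
  rw [PySem.List.foldl_append_singleton_eq_map convert_sentence text []]
  rfl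

theorem convert_sentence_eq (s : List String) :
    convert_sentence s = s.filter (fun p => (mainIdx p).isSome) := by
  simpa using PySem.List.foldl_append_if (fun p => (mainIdx p).isSome) id s []

theorem filterMap_filter_isSome (l : List String) (f : String → Option Nat) :
    (l.filter (fun p => (f p).isSome)).filterMap f = l.filterMap f := by
  induction l with
  | nil => rfl
  | cons a t ih =>
    cases hfa : f a with
    | none => simp [hfa, ih]
    | some c => simp [hfa, ih]

-- the main-POS code stream of a sentence
def ms (s : List String) : List Nat := s.filterMap mainIdx

-- bigram indices of one sentence: consecutive pairs of its main codes, offset off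
def biL (off : Nat) (s : List String) : List Nat :=
  ((ms s).zip (ms s).tail).map (fun ab => ab.1 * 6 + ab.2 + off)

-- an index fold over range(len-1) with getD lookups is the fold over zip-with-tail
theorem range_fold_zip {α β : Type} (l : List α) (d : α) (g : β → α → α → β) (v : β) :
    (List.range (l.length - 1)).foldl (fun v i => g v (l.getD i d) (l.getD (i + 1) d)) v
      = (l.zip l.tail).foldl (fun v ab => g v ab.1 ab.2) v := by
  induction l generalizing v with
  | nil => rfl
  | cons a t ih =>
    cases t with
    | nil => rfl
    | cons b t' =>
      have hlen : (a :: b :: t').length - 1 = (b :: t').length - 1 + 1 := by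
        simp [List.length_cons]
      rw [hlen, List.range_succ_eq_map, List.foldl_cons, List.foldl_map]
      simpa using ih (g v a b)

-- B's bigram step over a raw sentence is a pure fold over its main-code stream
def chainStep (off : Nat) (st : List Int × Option Nat) (c : Nat) : List Int × Option Nat :=
  (match st.2 with | some p => bump st.1 (p * 6 + c + off) | none => st.1, some c)

theorem biStepB_eq_chain (s : List String) (st : List Int × Option Nat) :
    s.foldl biStepB st = (ms s).foldl (chainStep 0) st := by
  induction s generalizing st with
  | nil => rfl
  | cons p t ih =>
    cases h : mainIdx p <;> simp [ms, h, biStepB, chainStep, ih, List.foldl_cons]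

theorem chain_some (off : Nat) (l : List Nat) (v : List Int) (p : Nat) :
    (l.foldl (chainStep off) (v, some p)).1
      = ((p :: l).zip l).foldl (fun v ab => bump v (ab.1 * 6 + ab.2 + off)) v := by
  induction l generalizing v p with
  | nil => rfl
  | cons c t ih => simpa [chainStep] using ih (bump v (p * 6 + c + off)) c

theorem chain_none (off : Nat) (l : List Nat) (v : List Int) :
    (l.foldl (chainStep off) (v, none)).1 = bumps v ((l.zip l.tail).map (fun ab => ab.1 * 6 + ab.2 + off)) := by
  cases l with
  | nil => rfl
  | cons c t =>
    rw [List.foldl_cons]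
    show (t.foldl (chainStep off) (v, some c)).1 = _
    rw [chain_some, bumps, List.foldl_map]
    rfl

-- A's bigram pass over one converted sentence succeeds and equals the pure pair fold
theorem biSentA_eq (off : Nat) (cs : List String) (hall : ∀ p ∈ cs, (mainIdx p).isSome)
    (v : List Int) :
    biSentA off (some v) cs
      = some (((cs.filterMap mainIdx).zip (cs.filterMap mainIdx).tail).foldl
          (fun v ab => bump v (ab.1 * 6 + ab.2 + off)) v) := by
  unfold biSentA
  refine (range_fold_zip cs "" (fun ov x y => ov.bind fun v =>
      match mainIdx x, mainIdx y with
      | some i1, some i2 => some (bump v (i1 * 6 + i2 + off))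
      | _, _ => none) (some v)).trans ?_
  induction cs generalizing v with
  | nil => rfl
  | cons p t ih =>
    obtain ⟨c, hc⟩ := Option.isSome_iff_exists.mp (hall p (List.mem_cons_self))
    cases t with
    | nil => simp [hc]
    | cons q t' =>
      obtain ⟨c2, hc2⟩ := Option.isSome_iff_exists.mp
        (hall q (List.mem_cons_of_mem p (List.mem_cons_self)))
      have ih' := ih (fun x hx => hall x (List.mem_cons_of_mem p hx)) (bump v (c * 6 + c2 + off))
      simp only [List.zip_cons_cons, List.tail_cons, List.foldl_cons,
        List.filterMap_cons, hc, hc2, Option.bind_some] at *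
      exact ih'

-- pure per-sentence bigram result, as bump-list
theorem bi_sentence_pure (s : List String) (v : List Int) :
    (s.foldl biStepB (v, none)).1 = bumps v (biL 0 s) := by
  rw [biStepB_eq_chain, chain_none]
  rfl

theorem ms_convert (s : List String) : (convert_sentence s).filterMap mainIdx = ms s := by
  rw [convert_sentence_eq, ms, filterMap_filter_isSome]

-- ===== unigram / mixed machinery =====
-- the (total) unigram slot of a known tag; on unknown tags its value is irrelevant (Pre_ excludes them)
def uIdx (p : String) : Nat :=
  match mainIdx p with
  | some i => i + 5
  | none => (extIdx p).getD 0

def Known (p : String) : Prop :=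
  p ∈ ["NOUN", "ADJ", "VERB", "PRT", "GRND", "ADVB", "NUMR", "PREP", "CONJ", "PRCL", "INTJ"]

theorem known_some (p : String) (h : Known p) : (mainIdx p).isSome ∨ (extIdx p).isSome := by
  unfold Known at h
  simp only [List.mem_cons, List.not_mem_nil, or_false] at h
  rcases h with rfl|rfl|rfl|rfl|rfl|rfl|rfl|rfl|rfl|rfl|rfl <;> simp [mainIdx, extIdx]

theorem uniStepA_known (p : String) (h : Known p) (v : List Int) :
    uniStepA (some v) p = some (bump v (uIdx p)) := by
  unfold uniStepA uIdx
  rcases known_some p h with hs | hs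
  · obtain ⟨c, hc⟩ := Option.isSome_iff_exists.mp hs
    simp [hc]
  · obtain ⟨c, hc⟩ := Option.isSome_iff_exists.mp hs
    cases hm : mainIdx p <;> simp [hc]

-- B's mixed step on a known tag, as a pure step
def mixPure (st : List Int × Option Nat) (p : String) : List Int × Option Nat :=
  match mainIdx p with
  | some c =>
    (match st.2 with
     | some q => bump (bump st.1 (c + 5)) (q * 6 + c + 11)
     | none => bump st.1 (c + 5), some c)
  | none => (bump st.1 (uIdx p), st.2)

theorem mixStepB_known (p : String) (h : Known p) (st : List Int × Option Nat) :
    mixStepB (some st) p = some (mixPure st p) := by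
  unfold mixStepB mixPure uIdx
  rcases known_some p h with hs | hs
  · obtain ⟨c, hc⟩ := Option.isSome_iff_exists.mp hs
    cases hp : st.2 <;> simp [hc, hp]
  · obtain ⟨c, hc⟩ := Option.isSome_iff_exists.mp hs
    cases hm : mainIdx p <;> simp [hc]

-- the interleaved bump-index stream of B's mixed pass over one sentence
def mixL (prev : Option Nat) : List String → List Nat
  | [] => []
  | p :: rest =>
    match mainIdx p with
    | some c =>
      (c + 5) :: ((match prev with | some q => [q * 6 + c + 11] | none => []) ++ mixL (some c) rest)
    | none => uIdx p :: mixL prev rest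

theorem mixPure_eq_bumps (s : List String) (v : List Int) (prev : Option Nat) :
    (s.foldl mixPure (v, prev)).1 = bumps v (mixL prev s) := by
  induction s generalizing v prev with
  | nil => rfl
  | cons p t ih =>
    rw [List.foldl_cons]
    cases hm : mainIdx p with
    | none => simpa [mixPure, hm, mixL, bumps] using ih (bump v (uIdx p)) prev
    | some c =>
      cases prev with
      | none => simpa [mixPure, hm, mixL, bumps] using ih (bump v (c + 5)) (some c)
      | some q =>
        simpa [mixPure, hm, mixL, bumps] using
          ih (bump (bump v (c + 5)) (q * 6 + c + 11)) (some c)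

-- chainL: the bigram indices emitted from a given prev state
def chainL (prev : Option Nat) : List Nat → List Nat
  | [] => []
  | c :: rest =>
    match prev with
    | some q => (q * 6 + c + 11) :: chainL (some c) rest
    | none => chainL (some c) rest

theorem chainL_some (q : Nat) (l : List Nat) :
    chainL (some q) l = ((q :: l).zip l).map (fun ab => ab.1 * 6 + ab.2 + 11) := by
  induction l generalizing q with
  | nil => rfl
  | cons c t ih => simp [chainL, ih c]

theorem chainL_none (l : List Nat) :
    chainL none l = (l.zip l.tail).map (fun ab => ab.1 * 6 + ab.2 + 11) := by
  cases l with
  | nil => rfl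
  | cons c t => simp [chainL, chainL_some]

-- the interleaved stream is a permutation of unigram indices ++ bigram indices
theorem mixL_perm (s : List String) (prev : Option Nat) :
    List.Perm (mixL prev s) (s.map uIdx ++ chainL prev (ms s)) := by
  induction s generalizing prev with
  | nil => simp [mixL, ms, chainL]
  | cons p t ih =>
    cases hm : mainIdx p with
    | none =>
      simp only [mixL, hm, ms, List.filterMap_cons, List.map_cons, List.cons_append]
      exact (ih prev).cons (uIdx p)
    | some c =>
      have hu : uIdx p = c + 5 := by unfold uIdx; rw [hm]
      simp only [mixL, hm, ms, List.filterMap_cons, List.map_cons, List.cons_append, hu]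
      refine List.Perm.cons (c + 5) ?_
      set opt : List Nat := (match prev with | some q => [q * 6 + c + 11] | none => []) with hopt
      have hch : chainL prev (c :: t.filterMap mainIdx) = opt ++ chainL (some c) (t.filterMap mainIdx) := by
        cases prev <;> simp [chainL, hopt]
      rw [hch]
      refine ((ih (some c)).append_left opt).trans ?_
      have h2 : (opt ++ t.map uIdx) ++ chainL (some c) (t.filterMap mainIdx)
          |>.Perm ((t.map uIdx ++ opt) ++ chainL (some c) (t.filterMap mainIdx)) :=
        (List.perm_append_comm).append_right _
      rw [List.append_assoc, List.append_assoc] at h2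
      simpa [ms] using h2

-- flatMap respects pointwise permutation, and distributes over ++ up to permutation
theorem flatMap_perm {α : Type} (ts : List α) (f g : α → List Nat)
    (h : ∀ t ∈ ts, List.Perm (f t) (g t)) :
    List.Perm (ts.flatMap f) (ts.flatMap g) := by
  induction ts with
  | nil => rfl
  | cons a t ih =>
    simp only [List.flatMap_cons]
    exact (h a (List.mem_cons_self)).append (ih fun t ht => h t (List.mem_cons_of_mem a ht))

theorem flatMap_append_perm {α : Type} (ts : List α) (f g : α → List Nat) :
    List.Perm (ts.flatMap fun t => f t ++ g t) (ts.flatMap f ++ ts.flatMap g) := by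
  induction ts with
  | nil => rfl
  | cons a t ih =>
    simp only [List.flatMap_cons]
    refine (ih.append_left (f a ++ g a)).trans ?_
    have h2 : (g a ++ t.flatMap f) ++ t.flatMap g
        |>.Perm ((t.flatMap f ++ g a) ++ t.flatMap g) :=
      (List.perm_append_comm).append_right _
    rw [List.append_assoc, List.append_assoc] at h2
    have h3 := h2.append_left (f a)
    simpa [List.append_assoc] using h3

-- nested pure folds as bumps over flatMap
theorem foldl_bumps_flatMap {α : Type} (ts : List α) (f : α → List Nat) (v : List Int) :
    ts.foldl (fun v t => bumps v (f t)) v = bumps v (ts.flatMap f) := by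
  induction ts generalizing v with
  | nil => rfl
  | cons a t ih =>
    rw [List.foldl_cons, List.flatMap_cons, bumps_append]
    exact ih (bumps v (f a))

-- ===== assembling the three branches =====
theorem bigram_eq (text : List (List String)) :
    build_vector text "bigram" = build_vector_alt text "bigram" := by
  show (convert_text text).foldl (biSentA 0) (some (List.replicate 36 (0 : Int)))
      = some (text.foldl (fun v s => (s.foldl biStepB (v, none)).1) (List.replicate 36 (0 : Int)))
  rw [convert_text_eq, List.foldl_map]
  rw [optlift text _ (fun v s => bumps v (biL 0 s)) ?_ (List.replicate 36 0)]
  · congr 1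
    refine PySem.List.foldl_congr_mem text _ _ _ (fun v s _ => ?_)
    rw [bi_sentence_pure]
  · intro s _ v
    rw [biSentA_eq 0 (convert_sentence s) ?hall v]
    · rw [ms_convert]
      simp only [biL, bumps, List.foldl_map]
    · intro p hp
      rw [convert_sentence_eq] at hp
      exact (List.mem_filter.mp hp).2

theorem mixed_eq (text : List (List String))
    (hk : ∀ s ∈ text, ∀ p ∈ s, Known p) :
    build_vector text "mixed" = build_vector_alt text "mixed" := by
  show (convert_text text).foldl (biSentA 11)
      (text.foldl (fun ov s => s.foldl uniStepA ov) (some (List.replicate 47 (0 : Int))))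
    = text.foldl (fun ov s => ov.bind fun v => (s.foldl mixStepB (some (v, none))).map Prod.fst)
      (some (List.replicate 47 (0 : Int)))
  -- A side: unigram phase
  have hA1 : text.foldl (fun ov s => s.foldl uniStepA ov) (some (List.replicate 47 (0 : Int)))
      = some (bumps (List.replicate 47 0) (text.flatMap (fun s => s.map uIdx))) := by
    rw [optlift text _ (fun v s => bumps v (s.map uIdx)) ?_ _]
    · rw [foldl_bumps_flatMap]
    · intro s hs v
      rw [optlift s _ (fun v p => bump v (uIdx p)) (fun p hp v => uniStepA_known p (hk s hs p hp) v) v]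
      simp only [bumps, List.foldl_map]
  -- A side: bigram phase
  rw [hA1, convert_text_eq, List.foldl_map]
  rw [optlift text _ (fun v s => bumps v (biL 11 s)) ?_ _]
  · -- B side
    rw [optlift text _ (fun v s => (s.foldl mixPure (v, none)).1) ?_ _]
    · congr 1
      have hB : text.foldl (fun v s => (s.foldl mixPure (v, none)).1) (List.replicate 47 0)
          = bumps (List.replicate 47 0) (text.flatMap (fun s => mixL none s)) := by
        rw [← foldl_bumps_flatMap]
        refine PySem.List.foldl_congr_mem text _ _ _ (fun v s _ => ?_)
        rw [mixPure_eq_bumps]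
      rw [hB, foldl_bumps_flatMap, ← bumps_append]
      refine (bumps_perm ?_ _).symm
      refine (flatMap_perm text _ (fun s => s.map uIdx ++ biL 11 s) (fun s _ => ?_)).trans
        (flatMap_append_perm text _ _)
      have h := mixL_perm s none
      rw [chainL_none] at h
      simpa [biL, ms] using h
    · intro s hs v
      rw [Option.bind_some,
        optlift s _ mixPure (fun p hp st => mixStepB_known p (hk s hs p hp) st) (v, none)]
      rfl
  · intro s _ v
    rw [biSentA_eq 11 (convert_sentence s) ?hall v]
    · rw [ms_convert]
      simp only [biL, bumps, List.foldl_map]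
    · intro p hp
      rw [convert_sentence_eq] at hp
      exact (List.mem_filter.mp hp).2

-- ===== VERDICT (by name: the statement is the Claim_ definition above) =====
theorem build_vector_spec : Claim_equal_build_vector := by
  intro text type _ hpre
  unfold Spec_build_vector
  by_cases hm : type = "mixed"
  · subst hm; exact mixed_eq text (hpre rfl)
  · by_cases hb : type = "bigram"
    · subst hb; exact bigram_eq text
    · simp [build_vector, build_vector_alt, hm, hb]
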